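-- pv_equiv track=rewrite | github.com/yebrwe/Algorithm | kakao/2020/internship/키패드.py | solution
-- ===== SOURCE A (Python) =====
-- from collections import deque
--
-- def solution(numbers, hand):
--     answer = ''
--     numpad = [
--         [1,2,3],
--         [4,5,6],
--         [7,8,9],
--         ['*',0,'#'],
--     ]
--
--     def get_distance(number, target):
--         n, m = len(numpad), len(numpad[0])
--         q = deque([])
--         dx = [1, 0, -1, 0]
--         dy = [0, 1, 0, -1]
--         visited = [[False]*m for _ in range(n)]
--
--         for i in range(n):
--             for j in range(m):
--                 if numpad[i][j] == number:
--                     visited[i][j] = True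
--                     q.insert(0, [j, i, 0])
--         while q:
--             [x, y, w] = q.pop()
--             if numpad[y][x] == target: return w
--             for i in range(4):
--                 nx, ny = x + dx[i], y + dy[i]
--                 if nx < 0 or nx > 2 or ny < 0 or ny > 3: continue
--                 if visited[ny][nx]: continue
--                 q.insert(0, [nx, ny, w+1])
--                 visited[ny][nx] = True
--         return -1
--
--     left = '*'
--     right = '#'
--     for number in numbers:
--         if number in [1,4,7]:
--             left = number
--             answer += 'L'
--         elif number in [3,6,9]:
--             right = number
--             answer += 'R'
--         else:
--             lw, rw = get_distance(left, number), get_distance(right, number)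
--             if lw < rw:
--                 answer += 'L'
--                 left = number
--             elif lw > rw:
--                 answer += 'R'
--                 right = number
--             else:
--                 if hand == 'right':
--                     answer += 'R'
--                     right = number
--                 else:
--                     answer += 'L'
--                     left = number
--     return answer
-- ===== SOURCE B (Python) =====
-- def solution(numbers, hand):
--     pos = {1: (0, 0), 2: (1, 0), 3: (2, 0),
--            4: (0, 1), 5: (1, 1), 6: (2, 1),
--            7: (0, 2), 8: (1, 2), 9: (2, 2),
--            '*': (0, 3), 0: (1, 3), '#': (2, 3)}
--
--     def dist(a, b):
--         # a key not on the keypad is unreachable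
--         if a not in pos or b not in pos:
--             return -1
--         (ax, ay), (bx, by) = pos[a], pos[b]
--         return abs(ax - bx) + abs(ay - by)
--
--     left, right = '*', '#'
--     answer = ''
--     for n in numbers:
--         if n in (1, 4, 7):
--             left = n
--             answer += 'L'
--         elif n in (3, 6, 9):
--             right = n
--             answer += 'R'
--         else:
--             lw, rw = dist(left, n), dist(right, n)
--             if lw < rw or (lw == rw and hand != 'right'):
--                 left = n
--                 answer += 'L'
--             else:
--                 right = n
--                 answer += 'R'
--     return answer
-- ===== Notes on version B (the rewrite author's own statement) =====
-- stated objective: faster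
-- what changed: Replaces the per-keystroke BFS over the keypad grid with a precomputed coordinate table and the Manhattan-distance formula (an off-keypad key is unreachable, distance -1, as in A), and merges A's three tie branches into one comparison.
import Mathlib
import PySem

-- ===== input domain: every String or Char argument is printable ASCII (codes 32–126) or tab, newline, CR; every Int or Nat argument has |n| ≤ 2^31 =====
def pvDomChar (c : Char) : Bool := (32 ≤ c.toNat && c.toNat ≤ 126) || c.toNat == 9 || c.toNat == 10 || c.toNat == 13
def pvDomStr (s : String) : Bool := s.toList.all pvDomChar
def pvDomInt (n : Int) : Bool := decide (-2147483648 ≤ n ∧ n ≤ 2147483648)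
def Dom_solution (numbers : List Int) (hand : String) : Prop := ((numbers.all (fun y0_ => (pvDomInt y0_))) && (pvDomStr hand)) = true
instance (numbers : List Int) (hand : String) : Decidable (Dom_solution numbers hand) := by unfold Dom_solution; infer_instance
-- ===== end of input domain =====

-- B replaces A's per-keystroke BFS by a coordinate table + Manhattan distance (same return value).

-- A keypad cell: a digit, '*' or '#' (Python mixes ints and strings in `numpad`).
inductive Cell : Type
  | num : Int → Cell
  | star : Cell
  | hash : Cell
deriving DecidableEq, Repr

-- ===== PORT A =====
def numpad : List (List Cell) :=
  [[Cell.num 1, Cell.num 2, Cell.num 3],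
   [Cell.num 4, Cell.num 5, Cell.num 6],
   [Cell.num 7, Cell.num 8, Cell.num 9],
   [Cell.star, Cell.num 0, Cell.hash]]

-- numpad[y][x] (in-range accesses only in A; `none` would be Python's IndexError)
def cellAt (y x : Int) : Option Cell :=
  (PySem.List.pyGet? numpad y).bind (fun row => PySem.List.pyGet? row x)

-- visited[y][x] and visited[y][x] = True on the 4×3 Boolean grid
def vget (vis : List (List Bool)) (y x : Int) : Bool :=
  ((PySem.List.pyGet? vis y).bind (fun row => PySem.List.pyGet? row x)).getD false

def vset (vis : List (List Bool)) (y x : Int) : List (List Bool) :=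
  vis.zipIdx.map (fun p =>
    if (p.2 : Int) = y then p.1.zipIdx.map (fun q => if (q.2 : Int) = x then true else q.1)
    else p.1)

def visited0 : List (List Bool) :=
  [[false, false, false], [false, false, false], [false, false, false], [false, false, false]]

-- the `while q:` loop of get_distance; q.insert(0, e) pushes in front, q.pop() takes from the back.
-- fuel is only a totality guard: each cell is enqueued at most once, so 60 ≫ any possible iteration count.
def bfsLoop : Nat → List (Int × Int × Int) → List (List Bool) → Cell → Int
  | 0, _, _, _ => -1
  | fuel + 1, q, vis, target =>
    match q.getLast? with
    | none => -1
    | some (x, y, w) =>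
      let q' := q.dropLast
      if cellAt y x = some target then w
      else
        let st := [((1 : Int), (0 : Int)), (0, 1), (-1, 0), (0, -1)].foldl
          (fun (p : List (Int × Int × Int) × List (List Bool)) d =>
            let nx := x + d.1
            let ny := y + d.2
            if nx < 0 ∨ nx > 2 ∨ ny < 0 ∨ ny > 3 then p
            else if vget p.2 ny nx then p
            else ((nx, ny, w + 1) :: p.1, vset p.2 ny nx)) (q', vis)
        bfsLoop fuel st.1 st.2 target

def getDistance (number target : Cell) : Int :=
  let init := (PySem.List.pyRange 0 4 1).foldl
    (fun (p : List (Int × Int × Int) × List (List Bool)) i =>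
      (PySem.List.pyRange 0 3 1).foldl
        (fun (p : List (Int × Int × Int) × List (List Bool)) j =>
          if cellAt i j = some number then ((j, i, 0) :: p.1, vset p.2 i j) else p) p)
    ([], visited0)
  bfsLoop 60 init.1 init.2 target

def stepA (hand : String) (st : Cell × Cell × String) (number : Int) : Cell × Cell × String :=
  let (left, right, answer) := st
  if number = 1 ∨ number = 4 ∨ number = 7 then (Cell.num number, right, answer ++ "L")
  else if number = 3 ∨ number = 6 ∨ number = 9 then (left, Cell.num number, answer ++ "R")
  else
    let lw := getDistance left (Cell.num number)
    let rw := getDistance right (Cell.num number)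
    if lw < rw then (Cell.num number, right, answer ++ "L")
    else if lw > rw then (left, Cell.num number, answer ++ "R")
    else if hand = "right" then (left, Cell.num number, answer ++ "R")
    else (Cell.num number, right, answer ++ "L")

def solution (numbers : List Int) (hand : String) : String :=
  (numbers.foldl (stepA hand) (Cell.star, Cell.hash, "")).2.2

-- ===== PORT B =====
-- the `pos` table
def posNum (n : Int) : Option (Int × Int) :=
  if n = 1 then some (0, 0) else if n = 2 then some (1, 0) else if n = 3 then some (2, 0)
  else if n = 4 then some (0, 1) else if n = 5 then some (1, 1) else if n = 6 then some (2, 1)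
  else if n = 7 then some (0, 2) else if n = 8 then some (1, 2) else if n = 9 then some (2, 2)
  else if n = 0 then some (1, 3) else none

def posOf : Cell → Option (Int × Int)
  | Cell.num n => posNum n
  | Cell.star => some (0, 3)
  | Cell.hash => some (2, 3)

def distAlt (a b : Cell) : Int :=
  match posOf a, posOf b with
  | some (ax, ay), some (bx, by_) => |ax - bx| + |ay - by_|
  | _, _ => -1

def stepB (hand : String) (st : Cell × Cell × String) (n : Int) : Cell × Cell × String :=
  let (left, right, answer) := st
  if n = 1 ∨ n = 4 ∨ n = 7 then (Cell.num n, right, answer ++ "L")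
  else if n = 3 ∨ n = 6 ∨ n = 9 then (left, Cell.num n, answer ++ "R")
  else
    let lw := distAlt left (Cell.num n)
    let rw := distAlt right (Cell.num n)
    if lw < rw ∨ (lw = rw ∧ hand ≠ "right") then (Cell.num n, right, answer ++ "L")
    else (left, Cell.num n, answer ++ "R")

def solution_alt (numbers : List Int) (hand : String) : String :=
  (numbers.foldl (stepB hand) (Cell.star, Cell.hash, "")).2.2

-- ===== PRECONDITION & SPEC =====
def Spec_solution (numbers : List Int) (hand : String) (out : String) : Prop := out = solution_alt numbers hand
instance (numbers : List Int) (hand : String) (out : String) : Decidable (Spec_solution numbers hand out) := by unfold Spec_solution; infer_instance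

-- ===== CLAIM (what is proved, stated in full; the proofs are below) =====
def Claim_equal_solution : Prop := ∀ (numbers : List Int) (hand : String), Dom_solution numbers hand → Spec_solution numbers hand (solution numbers hand)

-- ===== LEMMAS AND PROOFS =====

lemma posNum_some_cases (k : Int) (p : Int × Int) (h : posNum k = some p) :
    k = 0 ∨ k = 1 ∨ k = 2 ∨ k = 3 ∨ k = 4 ∨ k = 5 ∨ k = 6 ∨ k = 7 ∨ k = 8 ∨ k = 9 := by
  unfold posNum at h
  split_ifs at h <;> omega

lemma cellAt_onpad (y x : Int) (c : Cell) (h : cellAt y x = some c) : posOf c ≠ none := by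
  unfold cellAt at h
  rcases hr : PySem.List.pyGet? numpad y with _ | row
  · rw [hr] at h; simp at h
  · rw [hr] at h; simp at h
    have hrow : row ∈ numpad := PySem.List.mem_of_pyGet?_eq_some _ hr
    have hc : c ∈ row := PySem.List.mem_of_pyGet?_eq_some _ h
    simp [numpad] at hrow
    rcases hrow with h1 | h1 | h1 | h1 <;> subst h1 <;> simp at hc <;>
      rcases hc with h2 | h2 | h2 <;> subst h2 <;> simp [posOf, posNum]

lemma bfsLoop_congr (t t' : Cell)
    (h : ∀ y x : Int, (cellAt y x = some t) ↔ (cellAt y x = some t')) :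
    ∀ (fuel : Nat) (q : List (Int × Int × Int)) (vis : List (List Bool)),
      bfsLoop fuel q vis t = bfsLoop fuel q vis t' := by
  intro fuel
  induction fuel with
  | zero => intro q vis; rfl
  | succ n ih =>
    intro q vis
    simp only [bfsLoop]
    rcases q.getLast? with _ | ⟨x, y, w⟩
    · rfl
    · exact if_congr (h y x) rfl (ih _ _)

lemma getDistance_offpad_target (a : Cell) (m : Int) (hm : posNum m = none) :
    getDistance a (Cell.num m) = getDistance a (Cell.num 10) := by
  unfold getDistance
  apply bfsLoop_congr
  intro y x
  constructor <;> intro hc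
  · exact absurd (by simpa [posOf] using hm) (cellAt_onpad y x _ hc)
  · exact absurd (by simp [posOf, posNum]) (cellAt_onpad y x _ hc)

lemma getDistance_offpad_src (k : Int) (hk : posNum k = none) (t : Cell) :
    getDistance (Cell.num k) t = -1 := by
  have hcell : ∀ i j : Int, cellAt i j ≠ some (Cell.num k) := by
    intro i j h
    exact cellAt_onpad i j _ h (by simpa [posOf] using hk)
  have e : (PySem.List.pyRange 0 4 1).foldl
      (fun (p : List (Int × Int × Int) × List (List Bool)) i =>
        (PySem.List.pyRange 0 3 1).foldl
          (fun (p : List (Int × Int × Int) × List (List Bool)) j =>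
            if cellAt i j = some (Cell.num k) then ((j, i, 0) :: p.1, vset p.2 i j) else p) p)
      ([], visited0) = ([], visited0) := by
    simp [hcell, List.foldl_fixed]
  unfold getDistance
  rw [e]
  rfl

lemma distAlt_offpad_src (k : Int) (hk : posNum k = none) (t : Cell) :
    distAlt (Cell.num k) t = -1 := by
  simp [distAlt, posOf, hk]

lemma getDistance_eq (a b : Cell) : getDistance a b = distAlt a b := by
  -- first: sources not on the pad
  rcases ha : posOf a with _ | pa
  · rcases a with k | _ | _
    · simp only [posOf] at ha
      rw [getDistance_offpad_src k ha, distAlt_offpad_src k ha]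
    · simp [posOf] at ha
    · simp [posOf] at ha
  · -- a is on the pad: enumerate its 12 possibilities
    have hacase : a = Cell.star ∨ a = Cell.hash ∨ a = Cell.num 0 ∨ a = Cell.num 1 ∨
        a = Cell.num 2 ∨ a = Cell.num 3 ∨ a = Cell.num 4 ∨ a = Cell.num 5 ∨
        a = Cell.num 6 ∨ a = Cell.num 7 ∨ a = Cell.num 8 ∨ a = Cell.num 9 := by
      rcases a with k | _ | _
      · simp only [posOf] at ha
        rcases posNum_some_cases k pa ha with h | h | h | h | h | h | h | h | h | h <;>
          subst h <;> simp
      · simp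
      · simp
    rcases hb : posOf b with _ | pb
    · -- target off the pad: both are -1
      rcases b with m | _ | _
      · simp only [posOf] at hb
        rw [getDistance_offpad_target a m hb]
        have hd : distAlt a (Cell.num m) = -1 := by simp [distAlt, posOf, hb]
        rw [hd]
        rcases hacase with h | h | h | h | h | h | h | h | h | h | h | h <;> subst h <;> decide
      · simp [posOf] at hb
      · simp [posOf] at hb
    · -- both on the pad: 12 × 12 concrete cases
      have hbcase : b = Cell.star ∨ b = Cell.hash ∨ b = Cell.num 0 ∨ b = Cell.num 1 ∨
          b = Cell.num 2 ∨ b = Cell.num 3 ∨ b = Cell.num 4 ∨ b = Cell.num 5 ∨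
          b = Cell.num 6 ∨ b = Cell.num 7 ∨ b = Cell.num 8 ∨ b = Cell.num 9 := by
        rcases b with k | _ | _
        · simp only [posOf] at hb
          rcases posNum_some_cases k pb hb with h | h | h | h | h | h | h | h | h | h <;>
            subst h <;> simp
        · simp
        · simp
      rcases hacase with h | h | h | h | h | h | h | h | h | h | h | h <;> subst h <;>
        rcases hbcase with h | h | h | h | h | h | h | h | h | h | h | h <;> subst h <;> decide

lemma step_eq (hand : String) (st : Cell × Cell × String) (n : Int) :
    stepA hand st n = stepB hand st n := by
  obtain ⟨l, r, ans⟩ := st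
  simp only [stepA, stepB, getDistance_eq]
  by_cases h1 : n = 1 ∨ n = 4 ∨ n = 7
  · simp [h1]
  · by_cases h2 : n = 3 ∨ n = 6 ∨ n = 9
    · simp [h1, h2]
    · simp only [h1, h2, if_false]
      by_cases hlt : distAlt l (Cell.num n) < distAlt r (Cell.num n)
      · simp [hlt]
      · by_cases hgt : distAlt l (Cell.num n) > distAlt r (Cell.num n)
        · simp [hlt, hgt, show ¬ distAlt l (Cell.num n) = distAlt r (Cell.num n) from by omega]
        · have heq : distAlt l (Cell.num n) = distAlt r (Cell.num n) := by omega
          by_cases hh : hand = "right"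
          · simp [heq, hh]
          · simp [heq, hh]

-- ===== VERDICT (by name: the statement is the Claim_ definition above) =====
theorem solution_spec : Claim_equal_solution := by
  intro numbers hand _
  unfold Spec_solution solution solution_alt
  rw [show stepA hand = stepB hand from funext fun st => funext fun n => step_eq hand st n]
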